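-- pv_equiv track=rewrite | github.com/trungphan27/DL_project_20251 | Diffusion_model.py | _get_jump_schedule
-- ===== SOURCE A (Python) =====
-- def _get_jump_schedule(num_steps, jump_length, jump_n_sample):
--     schedule = []
--     t_idx = 0
--
--     while t_idx < num_steps:
--         remaining_steps = num_steps - t_idx
--
--         if remaining_steps > jump_length and jump_n_sample > 0:
--             for _ in range(jump_n_sample):
--                 for j in range(jump_length):
--                     if t_idx + j < num_steps - 1:
--                         schedule.append((t_idx + j, t_idx + j + 1))
--
--                 if t_idx + jump_length < num_steps:
--                     for j in range(jump_length - 1, -1, -1):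
--                         if t_idx + j < num_steps - 1:
--                             schedule.append((t_idx + j + 1, t_idx + j))
--
--             t_idx += jump_length
--         else:
--             for j in range(t_idx, num_steps - 1):
--                 schedule.append((j, j + 1))
--             break
--
--     return schedule
-- ===== SOURCE B (Python) =====
-- def _get_jump_schedule(num_steps, jump_length, jump_n_sample):
--     # Closed-form chunk count instead of a while loop: compute how many full
--     # jump windows fit, build one canonical forward+backward pattern once,
--     # and emit it shifted for every window by a flat comprehension.
--     if jump_length > 0 and jump_n_sample > 0:
--         chunks = max(0, -((jump_length - num_steps) // jump_length))  # ceil((num_steps-jump_length)/jump_length)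
--     else:
--         chunks = 0
--     if chunks > 0:
--         unit = [(t, t + 1) for t in range(jump_length)]
--         pattern = (unit + [(b, a) for (a, b) in reversed(unit)]) * jump_n_sample
--         body = [(i * jump_length + a, i * jump_length + b)
--                 for i in range(chunks) for (a, b) in pattern]
--     else:
--         body = []
--     t_idx = chunks * jump_length
--     return body + [(j, j + 1) for j in range(t_idx, num_steps - 1)]
-- ===== Notes on version B (the rewrite author's own statement) =====
-- stated objective: alternative
-- what changed: B replaces A's while loop and guarded nested index loops by a closed-form chunk count (ceil division), builds one canonical forward+backward pair pattern once, and emits it shifted per window in a single flat comprehension; the tail is a separate range comprehension.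
import Mathlib
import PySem

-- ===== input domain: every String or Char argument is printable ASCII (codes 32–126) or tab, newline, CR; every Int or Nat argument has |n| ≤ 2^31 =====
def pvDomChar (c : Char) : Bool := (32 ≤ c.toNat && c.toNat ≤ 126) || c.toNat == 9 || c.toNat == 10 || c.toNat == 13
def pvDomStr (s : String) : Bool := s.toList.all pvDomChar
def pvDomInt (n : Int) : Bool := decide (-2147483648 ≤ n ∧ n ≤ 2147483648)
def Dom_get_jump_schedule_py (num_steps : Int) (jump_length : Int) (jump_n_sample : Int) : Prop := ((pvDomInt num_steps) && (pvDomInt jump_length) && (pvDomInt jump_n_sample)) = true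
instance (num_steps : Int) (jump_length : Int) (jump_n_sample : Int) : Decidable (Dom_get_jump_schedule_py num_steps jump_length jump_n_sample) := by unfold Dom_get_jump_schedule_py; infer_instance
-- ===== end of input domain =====

-- B replaces A's while loop by a closed-form chunk count and emits one canonical
-- forward+backward pattern shifted per window by a flat comprehension (alternative decomposition).

-- ===== PORT A =====
-- one pass of 'for _ in range(jump_n_sample): …' body
def pvAInner (num_steps t_idx jump_length : Int) (sched : List (Int × Int)) : List (Int × Int) :=
  let s1 := (PySem.List.pyRange 0 jump_length 1).foldl (fun s j =>
    if t_idx + j < num_steps - 1 then s ++ [(t_idx + j, t_idx + j + 1)] else s) sched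
  if t_idx + jump_length < num_steps then
    (PySem.List.pyRange (jump_length - 1) (-1) (-1)).foldl (fun s j =>
      if t_idx + j < num_steps - 1 then s ++ [(t_idx + j + 1, t_idx + j)] else s) s1
  else s1

-- A's while loop; fuel only makes the recursion total (Pre_ excludes the inputs
-- on which Python A diverges; inside Pre_ the fuel is never exhausted)
def pvALoop (num_steps jump_length jump_n_sample : Int) : Nat → Int → List (Int × Int) → List (Int × Int)
  | 0, _, sched => sched
  | fuel + 1, t_idx, sched =>
    if t_idx < num_steps then
      if num_steps - t_idx > jump_length ∧ jump_n_sample > 0 then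
        pvALoop num_steps jump_length jump_n_sample fuel (t_idx + jump_length)
          ((PySem.List.pyRange 0 jump_n_sample 1).foldl
            (fun s _ => pvAInner num_steps t_idx jump_length s) sched)
      else
        sched ++ (PySem.List.pyRange t_idx (num_steps - 1) 1).map (fun j => (j, j + 1))
    else sched

def get_jump_schedule_py (num_steps : Int) (jump_length : Int) (jump_n_sample : Int) : List (Int × Int) :=
  pvALoop num_steps jump_length jump_n_sample (num_steps.toNat + 1) 0 []

-- ===== PORT B =====
-- 'lst * n' is ported as List.flatten (List.replicate n.toNat lst) — exact for Python
-- list repetition; 'max(0, -((W - ns) // W))' uses PySem.Int.floordiv (Python floor division).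
def get_jump_schedule_py_alt (num_steps : Int) (jump_length : Int) (jump_n_sample : Int) : List (Int × Int) :=
  let chunks :=
    if 0 < jump_length ∧ 0 < jump_n_sample then
      max 0 (-(PySem.Int.floordiv (jump_length - num_steps) jump_length))
    else 0
  let body :=
    if 0 < chunks then
      let unit := (PySem.List.pyRange 0 jump_length 1).map (fun t => (t, t + 1))
      let pattern := (List.replicate jump_n_sample.toNat
        (unit ++ unit.reverse.map (fun p => (p.2, p.1)))).flatten
      (PySem.List.pyRange 0 chunks 1).flatMap
        (fun i => pattern.map (fun p => (i * jump_length + p.1, i * jump_length + p.2)))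
    else []
  body ++ (PySem.List.pyRange (chunks * jump_length) (num_steps - 1) 1).map (fun j => (j, j + 1))

-- ===== PRECONDITION & SPEC =====
-- Pre_ excludes exactly the inputs on which Python A never returns: with num_steps > 0,
-- jump_n_sample > 0 and jump_length ≤ 0 the while loop never advances t_idx (A diverges).
def Pre_get_jump_schedule_py (num_steps : Int) (jump_length : Int) (jump_n_sample : Int) : Prop :=
  0 < jump_length ∨ jump_n_sample ≤ 0 ∨ num_steps ≤ 0
instance (num_steps : Int) (jump_length : Int) (jump_n_sample : Int) : Decidable (Pre_get_jump_schedule_py num_steps jump_length jump_n_sample) := by unfold Pre_get_jump_schedule_py; infer_instance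

def pvWitness_get_jump_schedule_py : Int × Int × Int := (10, 3, 2)

def Spec_get_jump_schedule_py (num_steps : Int) (jump_length : Int) (jump_n_sample : Int) (out : List (Int × Int)) : Prop := out = get_jump_schedule_py_alt num_steps jump_length jump_n_sample
instance (num_steps : Int) (jump_length : Int) (jump_n_sample : Int) (out : List (Int × Int)) : Decidable (Spec_get_jump_schedule_py num_steps jump_length jump_n_sample out) := by unfold Spec_get_jump_schedule_py; infer_instance

-- ===== CLAIM =====
def Claim_equal_get_jump_schedule_py : Prop := ∀ (num_steps : Int) (jump_length : Int) (jump_n_sample : Int), Dom_get_jump_schedule_py num_steps jump_length jump_n_sample → Pre_get_jump_schedule_py num_steps jump_length jump_n_sample → Spec_get_jump_schedule_py num_steps jump_length jump_n_sample (get_jump_schedule_py num_steps jump_length jump_n_sample)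

-- ===== LEMMAS AND PROOFS =====

-- proof-side names for B's local lets
def pvUnit (W : Int) : List (Int × Int) := (PySem.List.pyRange 0 W 1).map (fun t => (t, t + 1))
def pvPattern (W R : Int) : List (Int × Int) :=
  (List.replicate R.toNat (pvUnit W ++ (pvUnit W).reverse.map (fun p => (p.2, p.1)))).flatten
def pvChunks (ns W t : Int) : Int := max 0 (-(PySem.Int.floordiv (W - (ns - t)) W))
-- what A appends per chunk at offset t
def pvSeg (ns W R t : Int) : List (Int × Int) :=
  (List.replicate R.toNat
    ((PySem.List.pyRange t (t + W) 1).map (fun u => (u, u + 1))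
      ++ (PySem.List.pyRange (t + W - 1) (t - 1) (-1)).map (fun u => (u + 1, u)))).flatten
-- B's closed form generalized to start offset t
def pvFlat (ns W R t : Int) : List (Int × Int) :=
  (PySem.List.pyRange 0 (pvChunks ns W t) 1).flatMap
      (fun i => (pvPattern W R).map (fun p => (t + i * W + p.1, t + i * W + p.2)))
    ++ (PySem.List.pyRange (t + pvChunks ns W t * W) (ns - 1) 1).map (fun j => (j, j + 1))

theorem pvTail_nil (ns t : Int) (h : ns - 1 ≤ t) :
    (PySem.List.pyRange t (ns - 1) 1).map (fun j => (j, j + 1)) = [] := by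
  rw [PySem.List.pyRange_one_eq_nil h]; rfl

theorem pvFoldl_const_append {a b : Type} (l : List a) (seg s : List b) :
    l.foldl (fun s _ => s ++ seg) s = s ++ (List.replicate l.length seg).flatten := by
  induction l generalizing s with
  | nil => simp
  | cons x l ih => simp [List.foldl, ih, List.replicate_succ, List.append_assoc]

theorem pvFwd_eq (t jl : Int) :
    (PySem.List.pyRange 0 jl 1).map (fun j => (t + j, t + j + 1))
      = (PySem.List.pyRange t (t + jl) 1).map (fun u => (u, u + 1)) := by
  simp only [PySem.List.pyRange_one, List.map_map]
  have h1 : (jl - 0).toNat = jl.toNat := by omega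
  have h2 : (t + jl - t).toNat = jl.toNat := by omega
  rw [h1, h2]
  apply List.map_congr_left
  intro k _
  simp

theorem pvBwd_eq (t jl : Int) :
    (PySem.List.pyRange (jl - 1) (-1) (-1)).map (fun j => (t + j + 1, t + j))
      = (PySem.List.pyRange (t + jl - 1) (t - 1) (-1)).map (fun u => (u + 1, u)) := by
  simp only [PySem.List.pyRange_neg_one, List.map_map]
  have h1 : (jl - 1 - (-1)).toNat = jl.toNat := by omega
  have h2 : (t + jl - 1 - (t - 1)).toNat = jl.toNat := by omega
  rw [h1, h2]
  apply List.map_congr_left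
  intro k _
  simp
  omega

-- one pass of A's inner body appends exactly the forward then backward segment
theorem pvAInner_eq (ns t jl : Int) (_hjl : 0 < jl) (h : ns - t > jl) (s : List (Int × Int)) :
    pvAInner ns t jl s =
      s ++ ((PySem.List.pyRange t (t + jl) 1).map (fun u => (u, u + 1))
            ++ (PySem.List.pyRange (t + jl - 1) (t - 1) (-1)).map (fun u => (u + 1, u))) := by
  unfold pvAInner
  rw [if_pos (by omega : t + jl < ns)]
  rw [PySem.List.foldl_append_ite (fun j => t + j < ns - 1) (fun j => (t + j, t + j + 1)),
      PySem.List.foldl_append_ite (fun j => t + j < ns - 1) (fun j => (t + j + 1, t + j))]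
  rw [List.filter_eq_self.mpr, List.filter_eq_self.mpr]
  · rw [pvFwd_eq, pvBwd_eq, List.append_assoc]
  · intro j hj
    rw [PySem.List.mem_pyRange_neg_one] at hj
    simp; omega
  · intro j hj
    rw [PySem.List.mem_pyRange_one] at hj
    simp; omega

-- A's whole chunk (jump_n_sample passes) appends pvSeg
theorem pvChunk_eq (ns t jl js : Int) (hjl : 0 < jl) (h : ns - t > jl)
    (sched : List (Int × Int)) :
    (PySem.List.pyRange 0 js 1).foldl (fun s _ => pvAInner ns t jl s) sched =
      sched ++ pvSeg ns jl js t := by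
  have hbody := pvAInner_eq ns t jl hjl h
  simp only [hbody]
  rw [pvFoldl_const_append, PySem.List.length_pyRange_one]
  unfold pvSeg
  norm_num

-- B's canonical pattern shifted by s is exactly A's per-chunk segment
theorem pvPattern_shift (ns W R s : Int) :
    (pvPattern W R).map (fun p => (s + p.1, s + p.2)) = pvSeg ns W R s := by
  unfold pvPattern pvSeg
  rw [List.map_flatten, List.map_replicate]
  congr 2
  rw [List.map_append]
  congr 1
  · unfold pvUnit
    rw [List.map_map]
    have hf : ((fun p : Int × Int => (s + p.1, s + p.2)) ∘ fun t => (t, t + 1))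
        = fun j : Int => (s + j, s + j + 1) := by
      funext j; exact congrArg₂ Prod.mk rfl (by ring)
    rw [hf, pvFwd_eq]
  · unfold pvUnit
    rw [List.map_map, ← List.map_reverse, List.map_map]
    have hr : (PySem.List.pyRange 0 W 1).reverse = PySem.List.pyRange (W - 1) (-1) (-1) := by
      rw [PySem.List.pyRange_neg_one_eq_reverse]
      norm_num
    rw [hr, ← pvBwd_eq s W]
    apply List.map_congr_left
    intro j _
    simp only [Function.comp]
    exact congrArg₂ Prod.mk (by ring) rfl

theorem pvChunks_zero (ns W t : Int) (hW : 0 < W) (h : ns - t ≤ W) :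
    pvChunks ns W t = 0 := by
  unfold pvChunks
  have h0 : (0 : Int) ≤ PySem.Int.floordiv (W - (ns - t)) W := by
    rw [PySem.Int.le_floordiv_iff_mul_le hW]
    omega
  omega

theorem pvChunks_succ (ns W t : Int) (hW : 0 < W) (hc : W < ns - t) :
    pvChunks ns W t = pvChunks ns W (t + W) + 1 := by
  by_cases h2 : ns - t ≤ 2 * W
  · rw [pvChunks_zero ns W (t + W) hW (by omega)]
    unfold pvChunks
    have hx : W - (ns - t) = -(ns - t - W) := by ring
    rw [hx, (PySem.Int.neg_floordiv_neg_eq_iff_of_pos (a := ns - t - W) (q := 1) hW).mpr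
      ⟨by nlinarith, by nlinarith⟩]
    norm_num
  · unfold pvChunks
    have hx1 : W - (ns - t) = -(ns - t - W) := by ring
    have hx2 : W - (ns - (t + W)) = -(ns - t - 2 * W) := by ring
    rw [hx1, hx2]
    set q2 := -PySem.Int.floordiv (-(ns - t - 2 * W)) W with hq2
    have hbr := (PySem.Int.neg_floordiv_neg_eq_iff_of_pos (a := ns - t - 2 * W) hW).mp hq2.symm
    have hq2pos : 1 ≤ q2 := by nlinarith [hbr.1, hbr.2]
    have hstep : -PySem.Int.floordiv (-(ns - t - W)) W = q2 + 1 :=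
      (PySem.Int.neg_floordiv_neg_eq_iff_of_pos hW).mpr
        ⟨by nlinarith [hbr.1], by nlinarith [hbr.2]⟩
    rw [hstep]
    omega

theorem pvFlat_stop (ns W R t : Int) (hW : 0 < W) (h : ns - t ≤ W) :
    pvFlat ns W R t = (PySem.List.pyRange t (ns - 1) 1).map (fun j => (j, j + 1)) := by
  unfold pvFlat
  rw [pvChunks_zero ns W t hW h]
  simp [PySem.List.pyRange_one_eq_nil (by omega : (0:Int) ≤ 0)]

theorem pvFlat_step (ns W R t : Int) (hW : 0 < W) (hc : W < ns - t) :
    pvFlat ns W R t = pvSeg ns W R t ++ pvFlat ns W R (t + W) := by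
  unfold pvFlat
  rw [pvChunks_succ ns W t hW hc]
  set c := pvChunks ns W (t + W) with hcdef
  have hc0 : 0 ≤ c := by unfold pvChunks at hcdef; omega
  rw [PySem.List.pyRange_one_append 0 1 (c + 1) (by omega) (by omega), List.flatMap_append]
  have h01 : PySem.List.pyRange 0 1 1 = [0] := by decide
  rw [h01]
  have hridx : PySem.List.pyRange 1 (c + 1) 1 = (PySem.List.pyRange 0 c 1).map (fun k => 1 + k) := by
    simp only [PySem.List.pyRange_one, List.map_map]
    have he : (c + 1 - 1).toNat = (c - 0).toNat := by omega
    rw [he]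
    apply List.map_congr_left
    intro k _
    simp
  rw [hridx, List.flatMap_map]
  have hfun : (fun a : Int => (pvPattern W R).map
        fun p => (t + (1 + a) * W + p.1, t + (1 + a) * W + p.2))
      = (fun i : Int => (pvPattern W R).map
        fun p => (t + W + i * W + p.1, t + W + i * W + p.2)) := by
    funext a
    apply congrArg (fun f => List.map f (pvPattern W R))
    funext p
    exact congrArg₂ Prod.mk (by ring) (by ring)
  rw [hfun]
  have htl : t + (c + 1) * W = t + W + c * W := by ring
  rw [htl]
  simp only [List.flatMap_cons, List.flatMap_nil, List.append_nil, zero_mul, add_zero]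
  rw [pvPattern_shift ns, List.append_assoc]

theorem pvLoop_eq (ns jl js : Int) (hjl : 0 < jl) (hjs : 0 < js) :
    ∀ (fuel : Nat) (t : Int) (sched : List (Int × Int)), ns - t ≤ (fuel : Int) →
      pvALoop ns jl js fuel t sched = sched ++ pvFlat ns jl js t := by
  intro fuel
  induction fuel with
  | zero =>
    intro t sched h
    simp only [pvALoop]
    rw [pvFlat_stop ns jl js t hjl (by omega), pvTail_nil ns t (by omega)]
    simp
  | succ fuel ih =>
    intro t sched h
    by_cases hc : ns - t > jl
    · simp only [pvALoop]
      rw [if_pos (by omega : t < ns), if_pos ⟨hc, hjs⟩,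
          pvChunk_eq ns t jl js hjl hc sched,
          ih (t + jl) _ (by push_cast at h ⊢; omega),
          pvFlat_step ns jl js t hjl hc, List.append_assoc]
    · simp only [pvALoop]
      rw [pvFlat_stop ns jl js t hjl (by omega)]
      by_cases ht : t < ns
      · rw [if_pos ht, if_neg (by intro hx; exact hc hx.1)]
      · rw [if_neg ht, pvTail_nil ns t (by omega)]
        simp

-- ===== VERDICT =====
theorem get_jump_schedule_py_spec : Claim_equal_get_jump_schedule_py := by
  intro ns jl js _ hpre
  unfold Spec_get_jump_schedule_py get_jump_schedule_py get_jump_schedule_py_alt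
  by_cases hg : 0 < jl ∧ 0 < js
  · have := pvLoop_eq ns jl js hg.1 hg.2 (ns.toNat + 1) 0 [] (by push_cast; omega)
    rw [this]
    unfold pvFlat
    have hch : max 0 (-(PySem.Int.floordiv (jl - ns) jl)) = pvChunks ns jl 0 := by
      unfold pvChunks; norm_num
    simp only [if_pos hg, hch]
    by_cases hpos : 0 < pvChunks ns jl 0
    · rw [if_pos hpos]
      simp only [pvPattern, pvUnit, zero_add, List.nil_append]
    · rw [if_neg hpos]
      have h0 : pvChunks ns jl 0 = 0 := by
        have : 0 ≤ pvChunks ns jl 0 := by unfold pvChunks; omega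
        omega
      rw [h0, PySem.List.pyRange_one_eq_nil (le_refl (0 : Int))]
      simp
  · simp only [if_neg hg, lt_irrefl, if_false, zero_mul, List.nil_append]
    by_cases hjs : 0 < js
    · -- then jl ≤ 0, and Pre_ forces ns ≤ 0
      have hns : ns ≤ 0 := by
        rcases hpre with h | h | h <;> first | (exfalso; exact hg ⟨h, hjs⟩) | omega
      have hfuel : ns.toNat + 1 = 0 + 1 := by omega
      rw [hfuel]
      simp only [pvALoop]
      rw [if_neg (by omega : ¬ (0:Int) < ns), pvTail_nil ns 0 (by omega)]
    · by_cases hns : (0:Int) < ns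
      · simp only [pvALoop]
        rw [if_pos hns, if_neg (by intro hx; exact hjs hx.2)]
        simp
      · have hfuel : ns.toNat + 1 = 0 + 1 := by omega
        rw [hfuel]
        simp only [pvALoop]
        rw [if_neg hns, pvTail_nil ns 0 (by omega)]
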